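-- pv_equiv track=rewrite | github.com/kazukun15/like_MAGI | app.py | parse_swot_block
-- ===== SOURCE A (Python) =====
-- from typing import Dict, Any, Optional
--
-- def parse_swot_block(body: str) -> Dict[str, str]:
--     swot = {
--         "strengths": "",
--         "weaknesses": "",
--         "opportunities": "",
--         "threats": "",
--     }
--     lines = [l.strip() for l in body.splitlines() if l.strip()]
--     for line in lines:
--         if line.startswith("Strengths"):
--             swot["strengths"] = line.split(":", 1)[-1].strip()
--         elif line.startswith("Weaknesses"):
--             swot["weaknesses"] = line.split(":", 1)[-1].strip()
--         elif line.startswith("Opportunities"):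
--             swot["opportunities"] = line.split(":", 1)[-1].strip()
--         elif line.startswith("Threats"):
--             swot["threats"] = line.split(":", 1)[-1].strip()
--     return swot
-- ===== SOURCE B (Python) =====
-- def parse_swot_block(body: str) -> dict:
--     lines = [l.strip() for l in body.splitlines() if l.strip()]
--     swot = {}
--     for prefix, key in (
--         ("Strengths", "strengths"),
--         ("Weaknesses", "weaknesses"),
--         ("Opportunities", "opportunities"),
--         ("Threats", "threats"),
--     ):
--         value = ""
--         for line in lines:
--             if line.startswith(prefix):
--                 value = line.split(":", 1)[-1].strip()
--         swot[key] = value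
--     return swot
-- ===== Notes on version B (the rewrite author's own statement) =====
-- stated objective: alternative
-- what changed: Replaces A's single pass over the lines with an if/elif dispatch updating a pre-initialised dict by an outer loop over the four (prefix, key) pairs, each doing its own last-match-wins scan of the lines and appending the resulting field.
import Mathlib
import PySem

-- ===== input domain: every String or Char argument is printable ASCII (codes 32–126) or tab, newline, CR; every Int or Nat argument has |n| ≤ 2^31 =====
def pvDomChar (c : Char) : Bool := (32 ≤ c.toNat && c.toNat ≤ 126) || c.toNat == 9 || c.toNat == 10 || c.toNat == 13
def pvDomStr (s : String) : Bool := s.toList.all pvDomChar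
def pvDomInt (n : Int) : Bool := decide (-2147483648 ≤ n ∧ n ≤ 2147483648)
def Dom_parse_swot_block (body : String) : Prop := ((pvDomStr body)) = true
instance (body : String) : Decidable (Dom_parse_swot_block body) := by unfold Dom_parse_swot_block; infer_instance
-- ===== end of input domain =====

-- B replaces A's single if/elif-dispatch pass updating a dict with an outer loop over the four
-- (prefix, key) pairs, each doing its own last-match-wins scan of the lines (alternative decomposition, same cost).


-- shared by both ports: line.split(":", 1)[-1].strip()  (identical expression in both Pythons)
def pvVal (line : String) : String :=
  PySem.Str.strip ((PySem.List.pyGet? ((PySem.Str.splitMax? line ":" 1).getD [line]) (-1)).getD "")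

-- shared by both ports: [l.strip() for l in body.splitlines() if l.strip()]  (identical in both Pythons)
def pvLines (body : String) : List String :=
  ((PySem.Str.splitlines body).filter (fun l => PySem.Str.strip l ≠ "")).map PySem.Str.strip

-- ===== PORT A =====
def parse_swot_block (body : String) : List (String × String) :=
  let swot : PySem.Dict String String :=
    ((((PySem.Dict.empty).insert "strengths" "").insert "weaknesses" "").insert
        "opportunities" "").insert "threats" ""
  let lines := pvLines body
  let swot := lines.foldl (fun d line =>
    if PySem.Str.startswith line "Strengths" then d.insert "strengths" (pvVal line)
    else if PySem.Str.startswith line "Weaknesses" then d.insert "weaknesses" (pvVal line)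
    else if PySem.Str.startswith line "Opportunities" then d.insert "opportunities" (pvVal line)
    else if PySem.Str.startswith line "Threats" then d.insert "threats" (pvVal line)
    else d) swot
  swot.items

-- ===== PORT B =====
-- inner scan of B: last line starting with pref wins, "" if none
def pvLastMatch (lines : List String) (pref : String) : String :=
  lines.foldl (fun value line => if PySem.Str.startswith line pref then pvVal line else value) ""

def parse_swot_block_alt (body : String) : List (String × String) :=
  let lines := pvLines body
  [("strengths", pvLastMatch lines "Strengths"),
   ("weaknesses", pvLastMatch lines "Weaknesses"),
   ("opportunities", pvLastMatch lines "Opportunities"),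
   ("threats", pvLastMatch lines "Threats")]

-- ===== PRECONDITION & SPEC =====
def Spec_parse_swot_block (body : String) (out : List (String × String)) : Prop := out = parse_swot_block_alt body
instance (body : String) (out : List (String × String)) : Decidable (Spec_parse_swot_block body out) := by unfold Spec_parse_swot_block; infer_instance

-- ===== CLAIM (what is proved, stated in full; the proofs are below) =====
def Claim_equal_parse_swot_block : Prop := ∀ (body : String), Dom_parse_swot_block body → Spec_parse_swot_block body (parse_swot_block body)

-- ===== LEMMAS AND PROOFS =====

-- two nonempty prefixes with different first characters cannot both start the same line
theorem pv_excl (line p q : String)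
    (h0 : p.toList ≠ []) (h1 : q.toList ≠ []) (hne : p.toList.head? ≠ q.toList.head?)
    (hp : PySem.Str.startswith line p = true) :
    PySem.Str.startswith line q = false := by
  by_contra h
  rw [Bool.not_eq_false, PySem.Str.startswith_eq, PySem.Chars.startswith_iff] at h
  rw [PySem.Str.startswith_eq, PySem.Chars.startswith_iff] at hp
  obtain ⟨u, hu⟩ := hp
  obtain ⟨v, hv⟩ := h
  obtain ⟨a, ta, ha⟩ := List.exists_cons_of_ne_nil h0
  obtain ⟨b, tb, hb⟩ := List.exists_cons_of_ne_nil h1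
  apply hne
  have : (p.toList ++ u).head? = (q.toList ++ v).head? := by rw [hu, hv]
  rw [ha, hb] at this ⊢
  simpa using this


-- updating one of the four fixed keys of the literal dict
theorem pv_insS (s w o t v : String) :
    (PySem.Dict.mk [("strengths", s), ("weaknesses", w), ("opportunities", o), ("threats", t)]).insert "strengths" v
    = PySem.Dict.mk [("strengths", v), ("weaknesses", w), ("opportunities", o), ("threats", t)] := by
  simp [PySem.Dict.insert, PySem.Dict.contains]

theorem pv_insW (s w o t v : String) :
    (PySem.Dict.mk [("strengths", s), ("weaknesses", w), ("opportunities", o), ("threats", t)]).insert "weaknesses" v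
    = PySem.Dict.mk [("strengths", s), ("weaknesses", v), ("opportunities", o), ("threats", t)] := by
  simp [PySem.Dict.insert, PySem.Dict.contains]

theorem pv_insO (s w o t v : String) :
    (PySem.Dict.mk [("strengths", s), ("weaknesses", w), ("opportunities", o), ("threats", t)]).insert "opportunities" v
    = PySem.Dict.mk [("strengths", s), ("weaknesses", w), ("opportunities", v), ("threats", t)] := by
  simp [PySem.Dict.insert, PySem.Dict.contains]

theorem pv_insT (s w o t v : String) :
    (PySem.Dict.mk [("strengths", s), ("weaknesses", w), ("opportunities", o), ("threats", t)]).insert "threats" v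
    = PySem.Dict.mk [("strengths", s), ("weaknesses", w), ("opportunities", o), ("threats", v)] := by
  simp [PySem.Dict.insert, PySem.Dict.contains]

-- the dict fold of A, started from any four field values, computes B's four per-prefix folds
theorem pv_main (lines : List String) (s w o t : String) :
    (lines.foldl (fun d line =>
        if PySem.Str.startswith line "Strengths" then d.insert "strengths" (pvVal line)
        else if PySem.Str.startswith line "Weaknesses" then d.insert "weaknesses" (pvVal line)
        else if PySem.Str.startswith line "Opportunities" then d.insert "opportunities" (pvVal line)
        else if PySem.Str.startswith line "Threats" then d.insert "threats" (pvVal line)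
        else d)
      (PySem.Dict.mk [("strengths", s), ("weaknesses", w), ("opportunities", o), ("threats", t)])).items
    = [("strengths", lines.foldl (fun value line => if PySem.Str.startswith line "Strengths" then pvVal line else value) s),
       ("weaknesses", lines.foldl (fun value line => if PySem.Str.startswith line "Weaknesses" then pvVal line else value) w),
       ("opportunities", lines.foldl (fun value line => if PySem.Str.startswith line "Opportunities" then pvVal line else value) o),
       ("threats", lines.foldl (fun value line => if PySem.Str.startswith line "Threats" then pvVal line else value) t)] := by
  induction lines generalizing s w o t with
  | nil => rfl
  | cons line rest ih =>
    simp only [List.foldl_cons]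
    by_cases hS : PySem.Str.startswith line "Strengths" = true
    · have e1 := pv_excl line "Strengths" "Weaknesses" (by decide) (by decide) (by decide) hS
      have e2 := pv_excl line "Strengths" "Opportunities" (by decide) (by decide) (by decide) hS
      have e3 := pv_excl line "Strengths" "Threats" (by decide) (by decide) (by decide) hS
      simp only [hS, e1, e2, e3, if_true, Bool.false_eq_true, if_false]
      rw [pv_insS]
      exact ih (pvVal line) w o t
    · simp only [hS, Bool.false_eq_true, if_false]
      by_cases hW : PySem.Str.startswith line "Weaknesses" = true
      · have e2 := pv_excl line "Weaknesses" "Opportunities" (by decide) (by decide) (by decide) hW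
        have e3 := pv_excl line "Weaknesses" "Threats" (by decide) (by decide) (by decide) hW
        simp only [hW, e2, e3, if_true, Bool.false_eq_true, if_false]
        rw [pv_insW]
        exact ih s (pvVal line) o t
      · simp only [hW, Bool.false_eq_true, if_false]
        by_cases hO : PySem.Str.startswith line "Opportunities" = true
        · have e3 := pv_excl line "Opportunities" "Threats" (by decide) (by decide) (by decide) hO
          simp only [hO, e3, if_true, Bool.false_eq_true, if_false]
          rw [pv_insO]
          exact ih s w (pvVal line) t
        · simp only [hO, Bool.false_eq_true, if_false]
          by_cases hT : PySem.Str.startswith line "Threats" = true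
          · simp only [hT, if_true]
            rw [pv_insT]
            exact ih s w o (pvVal line)
          · simp only [hT, Bool.false_eq_true, if_false]
            exact ih s w o t

-- ===== VERDICT (by name: the statement is the Claim_ definition above) =====
theorem parse_swot_block_spec : Claim_equal_parse_swot_block := by
  intro body _
  show parse_swot_block body = parse_swot_block_alt body
  simp only [parse_swot_block, parse_swot_block_alt, pvLastMatch]
  rw [show ((((PySem.Dict.empty : PySem.Dict String String).insert "strengths" "").insert
        "weaknesses" "").insert "opportunities" "").insert "threats" ""
      = PySem.Dict.mk [("strengths", ""), ("weaknesses", ""), ("opportunities", ""), ("threats", "")]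
    from by decide]
  exact pv_main (pvLines body) "" "" "" ""
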